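-- pv_equiv track=rewrite | github.com/secnot/uva-onlinejudge-solutions | 10152 - ShellSort/main.py | shell_short
-- ===== SOURCE A (Python) =====
-- def shell_short(unordered, ordered):
--     """
--     Startig at the bottom of the stack:
--         1 - If the name is in the correct position move to the next
--         2 - If it is not in the position remove it, move all other names
--         one positions down and got to 1
--
--     sort all the removed positions, these names are the result
--     """
--     unordered = unordered[::-1]
--     ordered = ordered[::-1]
--     names = {}
--
--     for i, name in enumerate(ordered):
--         names[name] = i
--
--     # Stack using id instead of names
--     stack = [names[n] for n in unordered]
--
--     # Extract numbers that need reorderin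
--     reorder = []
--     for i in range(len(stack)):
--         if stack[i] != i-len(reorder):
--             reorder.append(stack[i])
--
--     return [ordered[n] for n in sorted(reorder)]
-- ===== SOURCE B (Python) =====
-- def shell_short(unordered, ordered):
--     # Counting/bucket approach: one pass with an "expected" counter instead of
--     # the index-vs-removed comparison, and a bucket count instead of sorting.
--     n = len(ordered)
--     rev = ordered[::-1]
--     pos = {}
--     for i, name in enumerate(rev):
--         pos[name] = i
--     count = [0] * n
--     expected = 0
--     for name in reversed(unordered):
--         v = pos[name]
--         if v == expected:
--             expected += 1
--         else:
--             count[v] += 1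
--     out = []
--     for v in range(n):
--         out.extend([rev[v]] * count[v])
--     return out
-- ===== Notes on version B (the rewrite author's own statement) =====
-- stated objective: alternative
-- what changed: B replaces A's intermediate id-stack with its index-vs-removed scan plus a comparison sort by a single 'expected next id' counter pass and a counting/bucket expansion over the ids (which all lie in 0..len(ordered)-1), so no sort is performed; it trades the sort for an O(n) bucket array.
import Mathlib
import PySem

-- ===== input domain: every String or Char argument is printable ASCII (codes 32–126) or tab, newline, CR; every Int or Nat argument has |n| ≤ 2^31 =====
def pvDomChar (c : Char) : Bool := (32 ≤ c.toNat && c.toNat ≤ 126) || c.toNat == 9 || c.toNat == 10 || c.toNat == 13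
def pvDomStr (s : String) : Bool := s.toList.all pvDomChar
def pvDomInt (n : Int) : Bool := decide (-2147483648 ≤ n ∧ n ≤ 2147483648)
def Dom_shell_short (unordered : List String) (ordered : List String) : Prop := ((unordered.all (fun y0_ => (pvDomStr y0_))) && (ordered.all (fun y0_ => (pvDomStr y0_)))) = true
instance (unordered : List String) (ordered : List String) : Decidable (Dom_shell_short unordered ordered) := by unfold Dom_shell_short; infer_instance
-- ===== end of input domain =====

-- B replaces A's scan-then-comparison-sort with one counter pass and a counting/bucket sort over the ids; equal wherever A returns (Pre_ excludes only the KeyError inputs).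

-- ===== PORT A =====
-- names = {}; for i, name in enumerate(l): names[name] = i
def pvBuildDict (l : List String) : PySem.Dict String Int :=
  (PySem.List.enumerate l).foldl (fun d p => d.insert p.2 p.1) PySem.Dict.empty

def shell_short (unordered : List String) (ordered : List String) : List String :=
  let u := unordered.reverse        -- unordered[::-1]  ([::-1] is reverse: PySem.List.slice?_none_none_neg_one)
  let o := ordered.reverse          -- ordered[::-1]
  let names := pvBuildDict o
  -- stack = [names[n] for n in unordered]; the KeyError (a name absent from ordered) is excluded by Pre_
  let stack : List Int := u.map (fun nm => (names.get? nm).getD 0)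
  -- for i in range(len(stack)): if stack[i] != i - len(reorder): reorder.append(stack[i])
  let reorder : List Int :=
    (PySem.List.pyRange 0 stack.length 1).foldl
      (fun acc i => if PySem.List.pyGetD stack i 0 ≠ i - acc.length then acc ++ [PySem.List.pyGetD stack i 0] else acc) []
  (PySem.List.sorted reorder (fun x => x) false).map (fun k => PySem.List.pyGetD o k "")

-- ===== PORT B =====
def shell_short_alt (unordered : List String) (ordered : List String) : List String :=
  let n := ordered.length
  let rev := ordered.reverse        -- ordered[::-1]
  let pos := pvBuildDict rev
  -- count = [0]*n; expected = 0; one pass over reversed(unordered)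
  let st := unordered.reverse.foldl
    (fun (st : List Int × Int) nm =>
      let v := ((pos.get? nm).getD 0)   -- pos[name]; KeyError excluded by Pre_
      if v = st.2 then (st.1, st.2 + 1)
      else (PySem.List.pySetD st.1 v (PySem.List.pyGetD st.1 v 0 + 1), st.2))
    (List.replicate n (0 : Int), (0 : Int))
  -- for v in range(n): out.extend([rev[v]] * count[v])
  (PySem.List.pyRange 0 n 1).foldl
    (fun out v => out ++ PySem.List.pyRepeat [PySem.List.pyGetD rev v ""] (PySem.List.pyGetD st.1 v 0))
    []

-- ===== PRECONDITION & SPEC =====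
-- Pre_ excludes exactly the inputs on which A raises KeyError: a name of unordered absent from ordered.
def Pre_shell_short (unordered : List String) (ordered : List String) : Prop :=
  ∀ nm ∈ unordered, nm ∈ ordered
instance (unordered : List String) (ordered : List String) : Decidable (Pre_shell_short unordered ordered) := by unfold Pre_shell_short; infer_instance

def pvWitness_shell_short : List String × List String := (["b", "a", "c"], ["a", "b", "c"])

def Spec_shell_short (unordered : List String) (ordered : List String) (out : List String) : Prop := out = shell_short_alt unordered ordered
instance (unordered : List String) (ordered : List String) (out : List String) : Decidable (Spec_shell_short unordered ordered out) := by unfold Spec_shell_short; infer_instance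

-- ===== CLAIM (what is proved, stated in full; the proofs are below) =====
def Claim_equal_shell_short : Prop := ∀ (unordered : List String) (ordered : List String), Dom_shell_short unordered ordered → Pre_shell_short unordered ordered → Spec_shell_short unordered ordered (shell_short unordered ordered)

-- ===== LEMMAS AND PROOFS =====

-- the ids A collects into `reorder`, written structurally
def pvRem : List Int → Int → List Int
  | [], _ => []
  | v :: rest, e => if v ≠ e then v :: pvRem rest e else pvRem rest (e + 1)

-- names not inserted do not change the lookup
theorem pvBuild_preserve (l : List String) : ∀ (s : Int) (d : PySem.Dict String Int) (nm : String), nm ∉ l →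
    ((PySem.List.enumerate l s).foldl (fun d p => d.insert p.2 p.1) d).get? nm = d.get? nm := by
  induction l with
  | nil => intro s d nm _; simp [PySem.List.enumerate_nil]
  | cons x rest ih =>
    intro s d nm h
    simp only [List.mem_cons, not_or] at h
    rw [PySem.List.enumerate_cons, List.foldl_cons, ih (s+1) _ nm h.2]
    exact PySem.Dict.get?_insert_of_ne d s h.1

-- every name of l gets an id in [s, s + len l)
theorem pvBuild_mem (l : List String) : ∀ (s : Int) (d : PySem.Dict String Int) (nm : String), nm ∈ l →
    ∃ k : Int, ((PySem.List.enumerate l s).foldl (fun d p => d.insert p.2 p.1) d).get? nm = some k ∧ s ≤ k ∧ k < s + l.length := by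
  induction l with
  | nil => intro _ _ _ h; simp at h
  | cons x rest ih =>
    intro s d nm h
    rw [PySem.List.enumerate_cons, List.foldl_cons]
    by_cases hr : nm ∈ rest
    · obtain ⟨k, hk, h1, h2⟩ := ih (s+1) _ nm hr
      exact ⟨k, hk, by omega, by simp only [List.length_cons]; push_cast at h2 ⊢; omega⟩
    · have hx : nm = x := (List.mem_cons.mp h).resolve_right hr
      refine ⟨s, ?_, le_refl s, by simp only [List.length_cons]; push_cast; omega⟩
      rw [pvBuild_preserve rest (s+1) _ nm hr]
      subst hx
      simp [PySem.Dict.get?_insert_self]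

theorem pvLook_bound (o : List String) (nm : String) (h : nm ∈ o) :
    0 ≤ ((pvBuildDict o).get? nm).getD 0 ∧ ((pvBuildDict o).get? nm).getD 0 < (o.length : Int) := by
  obtain ⟨k, hk, h1, h2⟩ := pvBuild_mem o 0 PySem.Dict.empty nm h
  unfold pvBuildDict
  rw [hk]
  simpa using ⟨h1, by omega⟩

-- A's index loop over the stack is pvRem
theorem pvA_loop (stack : List Int) : ∀ (s : List Int) (i : Nat) (acc : List Int), stack.drop i = s →
    (PySem.List.pyRange i stack.length 1).foldl
      (fun acc i => if PySem.List.pyGetD stack i 0 ≠ i - acc.length then acc ++ [PySem.List.pyGetD stack i 0] else acc) acc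
    = acc ++ pvRem s ((i : Int) - acc.length) := by
  intro s
  induction s with
  | nil =>
    intro i acc h
    have hle : stack.length ≤ i := by
      by_contra hlt
      have := List.drop_eq_nil_iff.mp h
      omega
    rw [PySem.List.pyRange_one_eq_nil (by exact_mod_cast hle)]
    simp [pvRem]
  | cons v rest ih =>
    intro i acc h
    have hi : i < stack.length := by
      by_contra hge
      rw [List.drop_eq_nil_iff.mpr (by omega)] at h
      exact List.cons_ne_nil _ _ h.symm
    have hv : stack[i] = v := by
      have := List.drop_eq_getElem_cons hi
      rw [h] at this
      exact (List.cons.injEq .. ▸ this).1.symm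
    have hget : PySem.List.pyGetD stack (i : Int) 0 = v := by
      rw [PySem.List.pyGetD_natCast]
      simp [List.getD, hv, List.getElem?_eq_getElem hi]
    have hdrop : stack.drop (i+1) = rest := by
      have h1 := congrArg (List.drop 1) h
      simp [List.drop_drop] at h1
      simpa [Nat.add_comm] using h1
    rw [PySem.List.pyRange_one_cons (by exact_mod_cast hi), List.foldl_cons]
    by_cases hc : v = (i : Int) - acc.length
    · rw [if_neg (by rw [hget]; simpa using hc)]
      have := ih (i+1) acc hdrop
      push_cast at this
      rw [this]
      have hr : pvRem (v :: rest) ((i:Int) - acc.length) = pvRem rest (((i:Int) - acc.length) + 1) := by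
        simp [pvRem, hc]
      rw [hr]
      congr 1
      congr 1
      ring
    · rw [if_pos (by rw [hget]; simpa using hc), hget]
      have := ih (i+1) (acc ++ [v]) hdrop
      push_cast at this
      rw [this]
      have h2 : pvRem (v :: rest) ((i:Int) - acc.length) = v :: pvRem rest ((i:Int) - acc.length) := by
        simp [pvRem, hc]
      rw [h2]
      have he : ((i:Int)+1) - (((acc ++ [v]).length : Nat) : Int) = (i:Int) - acc.length := by
        simp only [List.length_append, List.length_cons, List.length_nil]
        push_cast
        ring
      rw [he]
      simp

theorem pvRem_sub {vs : List Int} : ∀ {e x}, x ∈ pvRem vs e → x ∈ vs := by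
  induction vs with
  | nil => intro e x h; simp [pvRem] at h
  | cons v rest ih =>
    intro e x h
    unfold pvRem at h
    split at h
    · rcases List.mem_cons.mp h with h | h
      · exact h ▸ List.mem_cons_self ..
      · exact List.mem_cons_of_mem _ (ih h)
    · exact List.mem_cons_of_mem _ (ih h)

-- B's counting pass computes the histogram of pvRem
theorem pvB_hist (vs : List Int) : ∀ (e : Int) (count : List Int),
    (∀ x ∈ vs, 0 ≤ x ∧ x < (count.length : Int)) →
    (vs.foldl (fun (st : List Int × Int) v =>
        if v = st.2 then (st.1, st.2 + 1)
        else (PySem.List.pySetD st.1 v (PySem.List.pyGetD st.1 v 0 + 1), st.2)) (count, e)).1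
    = (List.range count.length).map (fun j => count.getD j 0 + ((pvRem vs e).count (j : Int) : Int)) := by
  induction vs with
  | nil =>
    intro e count _
    simp [pvRem, List.foldl_nil]
    exact (List.ext_getElem (by simp) (fun i h1 h2 => by simp [List.getElem?_eq_getElem (by simpa using h2)])).symm
  | cons v rest ih =>
    intro e count hb
    rw [List.foldl_cons]
    by_cases hv : v = e
    · rw [if_pos hv]
      rw [ih (e+1) count (fun x hx => hb x (List.mem_cons_of_mem _ hx))]
      have hr : pvRem (v :: rest) e = pvRem rest (e+1) := by simp [pvRem, hv]
      rw [hr]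
    · rw [if_neg hv]
      have hvb := hb v (List.mem_cons_self ..)
      have hset : PySem.List.pySetD count v (PySem.List.pyGetD count v 0 + 1)
          = count.set v.toNat (PySem.List.pyGetD count v 0 + 1) := PySem.List.pySetD_of_nonneg count _ hvb.1
      rw [hset]
      rw [ih e _ (by
        intro x hx
        have := hb x (List.mem_cons_of_mem _ hx)
        simpa using this)]
      have hrem : pvRem (v :: rest) e = v :: pvRem rest e := by simp [pvRem, hv]
      rw [hrem]
      simp only [List.length_set]
      apply List.map_congr_left
      intro j hj
      simp only [List.mem_range] at hj
      have hvt : v.toNat < count.length := by omega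
      by_cases hje : (j : Int) = v
      · have hjv : j = v.toNat := by omega
        subst hjv
        rw [List.getD_eq_getElem _ _ (by simpa using hvt), List.getElem_set_self,
            List.getD_eq_getElem _ _ hvt, List.count_cons,
            PySem.List.pyGetD_eq_getElem count 0 hvb.1 (by exact_mod_cast hvb.2)]
        simp [hje]
        ring
      · rw [List.getD_eq_getElem _ _ (by simpa using hj), List.getElem_set_ne (by omega),
            List.getD_eq_getElem _ _ hj, List.count_cons]
        simp [Ne.symm hje]

theorem pvBuckets_count (n : Nat) (l : List Int) (a : Int) :
    ((List.range n).flatMap (fun (v : Nat) => List.replicate (l.count (v : Int)) (v : Int))).count a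
    = if 0 ≤ a ∧ a < (n : Int) then l.count a else 0 := by
  induction n with
  | zero => simp
  | succ m ih =>
    rw [List.range_succ, List.flatMap_append, List.count_append, ih]
    simp only [List.flatMap_cons, List.flatMap_nil, List.append_nil, List.count_replicate]
    simp only [beq_iff_eq]
    push_cast
    by_cases ha : (m : Int) = a
    · subst ha
      rw [if_pos rfl, if_neg (by omega), if_pos (by omega)]
      ring
    · rw [if_neg ha]
      by_cases h0 : 0 ≤ a ∧ a < (m : Int)
      · rw [if_pos h0, if_pos (by omega)]
        ring
      · rw [if_neg h0, if_neg (by omega)]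

theorem pvBuckets_pairwise (n : Nat) (l : List Int) :
    ((List.range n).flatMap (fun (v : Nat) => List.replicate (l.count (v : Int)) (v : Int))).Pairwise (· ≤ ·) := by
  induction n with
  | zero => simp
  | succ m ih =>
    rw [List.range_succ, List.flatMap_append]
    apply List.pairwise_append.mpr
    refine ⟨ih, by simp [List.pairwise_replicate], ?_⟩
    intro x hx y hy
    simp only [List.mem_flatMap, List.mem_replicate] at hx
    obtain ⟨v, hv, _, rfl⟩ := hx
    simp only [List.flatMap_cons, List.flatMap_nil, List.append_nil, List.mem_replicate] at hy
    rw [hy.2]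
    simp only [List.mem_range] at hv
    exact_mod_cast Nat.le_of_lt hv

-- counting sort: sorted of a bounded Int list is the concatenation of its buckets
theorem pvSort_count (n : Nat) (l : List Int) (hb : ∀ x ∈ l, 0 ≤ x ∧ x < (n : Int)) :
    PySem.List.sorted l (fun x => x) false
    = (List.range n).flatMap (fun (v : Nat) => List.replicate (l.count (v : Int)) (v : Int)) := by
  apply PySem.List.sorted_id_eq_of_perm_of_pairwise
  · apply List.perm_iff_count.mpr
    intro a
    rw [pvBuckets_count]
    by_cases ha : 0 ≤ a ∧ a < (n : Int)
    · rw [if_pos ha]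
    · rw [if_neg ha]
      have : a ∉ l := fun hm => ha (hb a hm)
      exact (List.count_eq_zero.mpr this).symm
  · exact pvBuckets_pairwise n l

-- ===== VERDICT (by name: the statement is the Claim_ definition above) =====
theorem shell_short_spec : Claim_equal_shell_short := by
  intro unordered ordered _ hpre
  unfold Spec_shell_short shell_short shell_short_alt
  simp only []
  set o := ordered.reverse with ho
  set look := fun nm => ((pvBuildDict o).get? nm).getD (0 : Int) with hlook
  set stack := unordered.reverse.map look with hstack
  set n := ordered.length with hn
  have hno : o.length = n := by simp [ho, hn]
  have hbound : ∀ x ∈ stack, 0 ≤ x ∧ x < (n : Int) := by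
    intro x hx
    obtain ⟨nm, hnm, rfl⟩ := List.mem_map.mp hx
    have : nm ∈ o := by
      rw [ho, List.mem_reverse]
      exact hpre nm (List.mem_reverse.mp hnm)
    have := pvLook_bound o nm this
    rw [hno] at this
    exact this
  -- A's reorder loop
  have hA := pvA_loop stack stack 0 [] (by simp)
  push_cast at hA
  simp only [List.nil_append, List.length_nil, Nat.cast_zero, sub_zero] at hA
  rw [hA]
  set R := pvRem stack 0 with hR
  have hRb : ∀ x ∈ R, 0 ≤ x ∧ x < (n : Int) := fun x hx => hbound x (pvRem_sub hx)
  -- A's result as buckets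
  rw [pvSort_count n R hRb, List.map_flatMap]
  -- B's counting pass over the same values
  have hBF := pvB_hist stack 0 (List.replicate n (0 : Int)) (by simpa using hbound)
  conv at hBF => lhs; rw [hstack, List.foldl_map]
  rw [hlook] at hBF
  beta_reduce at hBF
  simp only [List.length_replicate] at hBF
  rw [hBF]
  -- B's output loop as flatMap
  rw [PySem.List.foldl_append_eq_flatMap]
  rw [List.nil_append]
  have hnr : PySem.List.pyRange 0 (n : Int) 1 = (List.range n).map (fun (k : Nat) => (k : Int)) :=
    PySem.List.pyRange_zero_nat n
  rw [hnr, List.flatMap_map]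
  apply List.flatMap_congr
  intro k hk
  simp only [List.mem_range] at hk
  rw [PySem.List.pyRepeat_singleton, List.map_replicate, PySem.List.pyGetD_natCast]
  have hz : (List.replicate n (0 : Int)).getD k 0 = 0 := by
    simp [List.getD_eq_getElem?_getD, hk]
  rw [PySem.List.pyGetD_natCast, PySem.List.getD_map_range _ _ _ _ hk, hz, zero_add,
      Int.toNat_natCast, hR]
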